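-- pv_equiv track=rewrite | github.com/chiangwyz/learnPython | 删除字符串中的三个连续相邻重复项.py | removeTripleDuplicates
-- ===== SOURCE A (Python) =====
-- def removeTripleDuplicates(s: str) -> str:
--     """
--     在字符串S中执行删除操作，删除连续三个或以上相同的字符。
--     重复执行此操作，直到不能再删除为止。
--     返回处理后的字符串。
--     :param S: str - 由小写字母组成的字符串
--     :return: str - 处理后的字符串
--     """
--     stack = []
--     for char in s:
--         # 当栈中至少有两个字符时，检查是否需要删除连续的字符
--         if len(stack) >= 2 and stack[-1] == char and stack[-2] == char:
--             # 如果当前字符与栈顶两个字符相同，则继续检查栈中后续字符是否相同，直到找到不同的字符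
--             while stack and stack[-1] == char:
--                 stack.pop()
--         else:
--             # 如果不符合删除条件，将当前字符推入栈中
--             stack.append(char)
--     # 将栈中剩余的字符连接起来，形成最终的字符串
--     return ''.join(stack)
-- ===== SOURCE B (Python) =====
-- def _delFirstTriple(s):
--     # one left-to-right scan: delete the leftmost run of three equal adjacent
--     # characters; None if the string has no such triple
--     for i in range(len(s) - 2):
--         if s[i] == s[i + 1] == s[i + 2]:
--             return s[:i] + s[i + 3:]
--     return None
--
--
-- def removeTripleDuplicates(s: str) -> str:
--     # fixpoint rewriting: keep deleting the leftmost
--     # triple of equal adjacent characters until none remains (the rule is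
--     # terminating and confluent, so the normal form is unique)
--     while True:
--         t = _delFirstTriple(s)
--         if t is None:
--             return s
--         s = t
-- ===== Notes on version B (the rewrite author's own statement) =====
-- stated objective: alternative
-- what changed: Replaces A's single-pass character stack (pop-while-equal on a forming triple) by fixpoint rewriting: repeatedly rescan the string and splice out the leftmost occurrence of three equal adjacent characters until none remains; equal because deleting a triple of equal adjacent characters is a terminating and confluent rewriting rule and A's stack computes its unique normal form.
import Mathlib
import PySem

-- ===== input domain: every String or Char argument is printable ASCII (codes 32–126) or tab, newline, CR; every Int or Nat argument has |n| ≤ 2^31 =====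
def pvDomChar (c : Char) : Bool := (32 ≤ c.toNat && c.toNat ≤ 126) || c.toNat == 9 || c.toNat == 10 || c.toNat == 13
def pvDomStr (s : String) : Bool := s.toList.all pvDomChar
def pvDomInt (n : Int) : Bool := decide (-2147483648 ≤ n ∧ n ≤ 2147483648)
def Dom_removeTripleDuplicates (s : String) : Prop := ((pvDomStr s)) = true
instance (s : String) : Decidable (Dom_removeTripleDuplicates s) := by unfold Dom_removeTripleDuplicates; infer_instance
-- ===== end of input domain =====

-- B replaces A's one-pass char stack by fixpoint rewriting: repeatedly delete the leftmost triple of equal adjacent chars until none remains; alternative structure, not faster.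


-- ===== PORT A =====
-- stack kept top-at-head; the final join reverses it back to Python's order
def pvPopWhileA (c : Char) : List Char → List Char
  | [] => []
  | x :: xs => if x = c then pvPopWhileA c xs else x :: xs

def pvStepA (st : List Char) (c : Char) : List Char :=
  if 2 ≤ st.length ∧ st.head? = some c ∧ st[1]? = some c then
    pvPopWhileA c st
  else
    c :: st

def removeTripleDuplicates (s : String) : String :=
  String.mk ((s.toList.foldl pvStepA []).reverse)

-- ===== PORT B =====
-- _delFirstTriple: scan left to right, delete the leftmost triple of equal
-- adjacent chars (some result), or none if there is no triple
def pvDelTriple : List Char → Option (List Char)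
  | a :: b :: c :: t =>
      if a = b ∧ b = c then some t
      else (pvDelTriple (b :: c :: t)).map (a :: ·)
  | _ => none

theorem pvDelTriple_length : ∀ (l l' : List Char), pvDelTriple l = some l' → l'.length + 3 = l.length := by
  intro l
  induction l with
  | nil => intro l' h; simp [pvDelTriple] at h
  | cons a t ih =>
      match t with
      | [] => intro l' h; simp [pvDelTriple] at h
      | [b] => intro l' h; simp [pvDelTriple] at h
      | b :: c :: t =>
          intro l' h
          simp only [pvDelTriple] at h
          split at h
          · simp at h; subst h; simp
          · simp only [Option.map_eq_some_iff] at h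
            obtain ⟨l'', h1, h2⟩ := h
            have := ih l'' h1
            subst h2; simp at this ⊢; omega

-- the while-loop of B: keep deleting the leftmost triple until none remains
def pvFixDel (l : List Char) : List Char :=
  match h : pvDelTriple l with
  | none => l
  | some l' => pvFixDel l'
termination_by l.length
decreasing_by have := pvDelTriple_length l l' h; omega

def removeTripleDuplicates_alt (s : String) : String :=
  String.mk (pvFixDel s.toList)

-- ===== PRECONDITION & SPEC =====
def Spec_removeTripleDuplicates (s : String) (out : String) : Prop := out = removeTripleDuplicates_alt s
instance (s : String) (out : String) : Decidable (Spec_removeTripleDuplicates s out) := by unfold Spec_removeTripleDuplicates; infer_instance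

-- ===== CLAIM (what is proved, stated in full; the proofs are below) =====
def Claim_equal_removeTripleDuplicates : Prop := ∀ (s : String), Dom_removeTripleDuplicates s → Spec_removeTripleDuplicates s (removeTripleDuplicates s)

-- ===== LEMMAS AND PROOFS =====

-- "no three equal adjacent chars"
def pvNoT : List Char → Bool
  | a :: b :: c :: t => !(a = b && b = c) && pvNoT (b :: c :: t)
  | _ => true

theorem pvNoT_tail : ∀ (x : Char) (l : List Char), pvNoT (x :: l) = true → pvNoT l = true := by
  intro x l h
  match l with
  | [] => rfl
  | [b] => rfl
  | b :: c :: t => simp only [pvNoT, Bool.and_eq_true] at h; exact h.2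

theorem pvNoT_triple : ∀ (u : List Char) (c : Char) (v : List Char),
    ¬ pvNoT (u ++ c :: c :: c :: v) = true := by
  intro u c v h
  induction u with
  | nil => simp [pvNoT] at h
  | cons x us ih => exact ih (pvNoT_tail x _ h)

theorem pvDelTriple_none_iff (l : List Char) : pvDelTriple l = none ↔ pvNoT l = true := by
  induction l with
  | nil => simp [pvDelTriple, pvNoT]
  | cons a t ih =>
      match t with
      | [] => simp [pvDelTriple, pvNoT]
      | [b] => simp [pvDelTriple, pvNoT]
      | b :: c :: t =>
          simp only [pvDelTriple, pvNoT]
          by_cases hbc : a = b ∧ b = c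
          · simp [hbc.1, hbc.2]
          · have : ¬ (a = b && b = c) = true := by
              simp only [Bool.and_eq_true, decide_eq_true_eq]; exact hbc
            simp only [if_neg hbc, Option.map_eq_none_iff, this]
            simpa using ih

theorem pvPopWhileA_stop (c : Char) (l : List Char)
    (h : ∀ x t, l = x :: t → x ≠ c) : pvPopWhileA c l = l := by
  match l with
  | [] => rfl
  | x :: t => simp [pvPopWhileA, h x t rfl]

theorem pvNoT_popWhileA (c : Char) (l : List Char) (h : pvNoT l = true) :
    pvNoT (pvPopWhileA c l) = true := by
  induction l with
  | nil => exact h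
  | cons x t ih =>
      simp only [pvPopWhileA]
      split
      · exact ih (pvNoT_tail x t h)
      · exact h

theorem pvNoT_step (st : List Char) (c : Char) (h : pvNoT st = true) :
    pvNoT (pvStepA st c) = true := by
  unfold pvStepA
  split
  · exact pvNoT_popWhileA c st h
  · rename_i hcond
    rcases st with _ | ⟨x, st2⟩
    · rfl
    rcases st2 with _ | ⟨y, r⟩
    · rfl
    have hxy : ¬ (x = c ∧ y = c) := by
      intro hc
      exact hcond ⟨by simp, by simp [hc.1], by simp [hc.2]⟩
    show pvNoT (c :: x :: y :: r) = true
    simp only [pvNoT, Bool.and_eq_true]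
    refine ⟨?_, h⟩
    by_cases h1 : c = x
    · by_cases h2 : x = y
      · exact absurd ⟨h1.symm, h2.symm.trans h1.symm⟩ hxy
      · simp [h1, h2]
    · simp [h1]

-- feeding three equal chars into a triple-free stack leaves it unchanged
theorem pvAbsorb (st : List Char) (c : Char) (h : pvNoT st = true) :
    pvStepA (pvStepA (pvStepA st c) c) c = st := by
  rcases st with _ | ⟨x, st2⟩
  · simp [pvStepA, pvPopWhileA]
  rcases st2 with _ | ⟨y, r⟩
  · by_cases hdc : x = c
    · subst hdc; simp [pvStepA, pvPopWhileA]
    · simp [pvStepA, pvPopWhileA, hdc, Ne.symm hdc]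
  by_cases hxc : x = c
  · by_cases hyc : y = c
    · subst hxc; subst hyc
      -- st = y :: y :: r (both equal to c), and pvNoT st forces r's head ≠ y
      have hr : ∀ z t, r = z :: t → z ≠ y := by
        intro z t hz hzc
        rw [hz, hzc] at h
        exact pvNoT_triple [] y t h
      have h1 : pvStepA (y :: y :: r) y = r := by
        unfold pvStepA
        rw [if_pos ⟨by simp, by simp, by simp⟩]
        simp [pvPopWhileA, pvPopWhileA_stop y r hr]
      rw [h1]
      rcases r with _ | ⟨z, t⟩
      · simp [pvStepA, pvPopWhileA]
      · have hz : z ≠ y := hr z t rfl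
        simp [pvStepA, pvPopWhileA, hz, Ne.symm hz]
    · subst hxc
      simp [pvStepA, pvPopWhileA, hyc, Ne.symm hyc]
  · simp [pvStepA, pvPopWhileA, hxc, Ne.symm hxc]

-- deleting the leftmost triple does not change A's fold
theorem pvFoldl_del : ∀ (l : List Char) (st : List Char) (l' : List Char),
    pvNoT st = true → pvDelTriple l = some l' →
    l.foldl pvStepA st = l'.foldl pvStepA st := by
  intro l
  induction l with
  | nil => intro st l' _ h; simp [pvDelTriple] at h
  | cons a t ih =>
      intro st l' hst h
      match t with
      | [] => simp [pvDelTriple] at h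
      | [b] => simp [pvDelTriple] at h
      | b :: c :: t =>
          simp only [pvDelTriple] at h
          split at h
          · rename_i habc
            obtain ⟨hab, hbc⟩ := habc
            simp only [Option.some.injEq] at h
            subst h; subst hab; subst hbc
            simp only [List.foldl_cons]
            rw [pvAbsorb st a hst]
          · simp only [Option.map_eq_some_iff] at h
            obtain ⟨l'', h1, h2⟩ := h
            subst h2
            simp only [List.foldl_cons]
            exact ih (pvStepA st a) l'' (pvNoT_step st a hst) h1

-- on a triple-free input A's fold just reverses the input onto the stack
theorem pvFoldl_noT : ∀ (l : List Char) (st : List Char),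
    pvNoT (st.reverse ++ l) = true → l.foldl pvStepA st = l.reverse ++ st := by
  intro l
  induction l with
  | nil => intro st _; simp
  | cons c t ih =>
      intro st h
      have hpush : pvStepA st c = c :: st := by
        unfold pvStepA
        rw [if_neg]
        intro hc
        obtain ⟨hlen, hhd, h1⟩ := hc
        rcases st with _ | ⟨x, st2⟩
        · simp at hlen
        rcases st2 with _ | ⟨y, r⟩
        · simp at hlen
        simp only [List.head?_cons, Option.some.injEq] at hhd
        simp only [List.getElem?_cons_succ, List.getElem?_cons_zero, Option.some.injEq] at h1
        rw [hhd, h1] at h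
        apply pvNoT_triple r.reverse c t
        simpa using h
      rw [List.foldl_cons, hpush]
      have h' : pvNoT ((c :: st).reverse ++ t) = true := by
        simpa using h
      rw [ih (c :: st) h']
      simp

theorem pvMain : ∀ (l : List Char), pvFixDel l = (l.foldl pvStepA []).reverse := by
  intro l
  induction l using pvFixDel.induct with
  | case1 l h =>
      rw [pvFixDel.eq_def]
      split
      · rename_i heq
        have hnt : pvNoT l = true := (pvDelTriple_none_iff l).mp h
        rw [pvFoldl_noT l [] (by simpa using hnt)]
        simp
      · rename_i l'' heq
        simp [h] at heq
  | case2 l l' h ih =>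
      rw [pvFixDel.eq_def]
      split
      · rename_i heq
        simp [h] at heq
      · rename_i l'' heq
        rw [h] at heq
        injection heq with heq'
        subst heq'
        rw [pvFoldl_del l [] l' rfl h]
        exact ih

-- ===== VERDICT (by name: the statement is the Claim_ definition above) =====
theorem removeTripleDuplicates_spec : Claim_equal_removeTripleDuplicates := by
  intro s _
  unfold Spec_removeTripleDuplicates removeTripleDuplicates removeTripleDuplicates_alt
  rw [pvMain]
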